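-- pv_equiv track=rewrite | github.com/bhuwansharma27-maker/Cpg | cpg_app_1.py | get_compliance_score
-- ===== SOURCE A (Python) =====
-- from typing import Any
--
-- def get_compliance_score(issues: list[dict[str, Any]]) -> str:
--     severities = {i["severity"] for i in issues}
--     if "critical" in severities:
--         return "Needs Review"
--     if "warning" in severities:
--         return "Caution"
--     if "info" in severities:
--         return "Minor Notes"
--     return "Compliant"
-- ===== SOURCE B (Python) =====
-- def get_compliance_score(issues: list[dict[str, object]]) -> str:
--     ranks = {"critical": 3, "warning": 2, "info": 1}
--     best = 0
--     for i in issues: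
--         best = max(best, ranks.get(i["severity"], 0))
--     return ("Compliant", "Minor Notes", "Caution", "Needs Review")[best]
-- ===== Notes on version B (the rewrite author's own statement) =====
-- stated objective: simpler
-- what changed: Replaces building a set of severities and probing it three times with a single fold to the maximum numeric severity rank, mapped back to a label by one tuple lookup.
import Mathlib
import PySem

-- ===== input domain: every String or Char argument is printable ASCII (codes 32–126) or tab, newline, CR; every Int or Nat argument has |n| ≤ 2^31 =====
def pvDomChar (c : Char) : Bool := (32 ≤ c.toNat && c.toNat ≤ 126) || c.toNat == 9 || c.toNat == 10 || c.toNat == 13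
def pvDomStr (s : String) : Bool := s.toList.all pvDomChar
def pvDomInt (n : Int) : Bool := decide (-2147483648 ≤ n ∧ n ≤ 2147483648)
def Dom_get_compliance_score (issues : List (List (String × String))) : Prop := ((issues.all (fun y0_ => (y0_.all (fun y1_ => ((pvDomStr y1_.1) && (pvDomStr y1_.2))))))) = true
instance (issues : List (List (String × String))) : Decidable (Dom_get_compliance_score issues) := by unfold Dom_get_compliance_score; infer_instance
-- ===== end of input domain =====

-- B replaces A's set-then-three-membership-probes with fold-to-max-rank-then-map-once; same O(n) cost, simpler shape.

-- ===== PORT A =====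
-- i["severity"]; total via getD, exact under Pre_ (key present in every issue)
def pvSev (i : List (String × String)) : String := (PySem.Dict.mk i).getD "severity" ""

def get_compliance_score (issues : List (List (String × String))) : String :=
  let severities : PySem.Set String := PySem.Set.ofList (issues.map (fun i => pvSev i))
  if PySem.Set.contains severities "critical" then "Needs Review"
  else if PySem.Set.contains severities "warning" then "Caution"
  else if PySem.Set.contains severities "info" then "Minor Notes"
  else "Compliant"

-- ===== PORT B =====
-- ranks.get(s, 0)
def pvRank (s : String) : Int :=
  if s = "critical" then 3 else if s = "warning" then 2 else if s = "info" then 1 else 0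

def get_compliance_score_alt (issues : List (List (String × String))) : String :=
  let best : Int := issues.foldl (fun b i => max b (pvRank (pvSev i))) 0
  PySem.List.pyGetD ["Compliant", "Minor Notes", "Caution", "Needs Review"] best ""

-- ===== PRECONDITION & SPEC =====
-- Pre_ excludes exactly the inputs where A (and B alike) raises KeyError: an issue without a "severity" key.
def Pre_get_compliance_score (issues : List (List (String × String))) : Prop :=
  ∀ i ∈ issues, ((PySem.Dict.mk i).get? "severity").isSome = true
instance (issues : List (List (String × String))) : Decidable (Pre_get_compliance_score issues) := by unfold Pre_get_compliance_score; infer_instance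
def pvWitness_get_compliance_score : (List (List (String × String))) := [[("severity", "warning")]]

def Spec_get_compliance_score (issues : List (List (String × String))) (out : String) : Prop := out = get_compliance_score_alt issues
instance (issues : List (List (String × String))) (out : String) : Decidable (Spec_get_compliance_score issues out) := by unfold Spec_get_compliance_score; infer_instance

-- ===== CLAIM (what is proved, stated in full; the proofs are below) =====
def Claim_equal_get_compliance_score : Prop := ∀ (issues : List (List (String × String))), Dom_get_compliance_score issues → Pre_get_compliance_score issues → Spec_get_compliance_score issues (get_compliance_score issues)

-- ===== LEMMAS AND PROOFS =====

-- the if-chain value A's membership tests compute, as an Int rank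
def pvChain (l : List String) : Int :=
  if "critical" ∈ l then 3 else if "warning" ∈ l then 2 else if "info" ∈ l then 1 else 0

lemma pvChain_nonneg (l : List String) : 0 ≤ pvChain l := by
  unfold pvChain; split_ifs <;> omega

lemma pvChain_cons (s : String) (l : List String) :
    pvChain (s :: l) = max (pvRank s) (pvChain l) := by
  unfold pvChain pvRank
  by_cases h1 : s = "critical" <;> by_cases h2 : s = "warning" <;> by_cases h3 : s = "info" <;>
    simp [h1, h2, h3, List.mem_cons] <;> split_ifs <;> simp_all

lemma foldl_max_rank (l : List String) (a : Int) (ha : 0 ≤ a) :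
    l.foldl (fun b s => max b (pvRank s)) a = max a (pvChain l) := by
  induction l generalizing a with
  | nil =>
    have : pvChain [] = 0 := by decide
    simp only [List.foldl_nil, this]
    omega
  | cons s l ih =>
    have hr : (0 : Int) ≤ pvRank s := by unfold pvRank; split_ifs <;> omega
    simp only [List.foldl_cons]
    rw [ih (max a (pvRank s)) (by omega), pvChain_cons]
    omega

lemma mem_sevs (issues : List (List (String × String))) (x : String) :
    PySem.Set.contains (PySem.Set.ofList (issues.map (fun i => pvSev i))) x = true ↔
      x ∈ issues.map (fun i => pvSev i) := by
  rw [PySem.Set.contains_iff, PySem.Set.mem_ofList]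

theorem get_compliance_score_spec : Claim_equal_get_compliance_score := by
  intro issues _ _
  unfold Spec_get_compliance_score get_compliance_score get_compliance_score_alt
  have hfold : issues.foldl (fun b i => max b (pvRank (pvSev i))) 0
      = (issues.map (fun i => pvSev i)).foldl (fun b s => max b (pvRank s)) 0 := by
    rw [List.foldl_map]
  rw [hfold, foldl_max_rank _ 0 le_rfl]
  have h0 : max (0 : Int) (pvChain (issues.map (fun i => pvSev i))) = pvChain (issues.map (fun i => pvSev i)) := by
    have := pvChain_nonneg (issues.map (fun i => pvSev i))
    omega
  rw [h0]
  simp only [mem_sevs]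
  unfold pvChain
  split_ifs <;> simp [PySem.List.pyGetD]
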